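-- pv_equiv track=rewrite | github.com/lkpetrich/Preference-Voting | PrefVote.py | ListOrderFromMatrix
-- ===== SOURCE A (Python) =====
-- def ListOrderFromMatrix(ordmat):
-- 	n = len(ordmat)
-- 	ixskeys = []
-- 	for i in range(n):
-- 		keyval = 0
-- 		for j in range(n):
-- 			omdiff = ordmat[i][j] - ordmat[j][i]
-- 			if omdiff > 0:
-- 				keyval += 1
-- 			elif omdiff < 0:
-- 				keyval -= 1
-- 		ixskeys.append( (i,keyval) )
--
-- 	ixskeys.sort(key=lambda x: x[1])
-- 	return tuple( (x[0] for x in ixskeys) )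
-- ===== SOURCE B (Python) =====
-- def ListOrderFromMatrix(ordmat):
-- 	n = len(ordmat)
-- 	buckets = [[] for _ in range(2*n + 1)]
-- 	for i in range(n):
-- 		row = ordmat[i]
-- 		s = sum((row[j] > ordmat[j][i]) - (row[j] < ordmat[j][i]) for j in range(n))
-- 		buckets[s + n].append(i)
-- 	out = []
-- 	for b in buckets:
-- 		out.extend(b)
-- 	return tuple(out)
-- ===== Notes on version B (the rewrite author's own statement) =====
-- stated objective: alternative
-- what changed: B replaces A's comparison sort of (index,score) pairs by a counting/bucket sort: scores lie in [-n, n], so each index is dropped into bucket score+n and the buckets are concatenated in bucket order, which is stable by construction and avoids the comparison sort entirely.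
import Mathlib
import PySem

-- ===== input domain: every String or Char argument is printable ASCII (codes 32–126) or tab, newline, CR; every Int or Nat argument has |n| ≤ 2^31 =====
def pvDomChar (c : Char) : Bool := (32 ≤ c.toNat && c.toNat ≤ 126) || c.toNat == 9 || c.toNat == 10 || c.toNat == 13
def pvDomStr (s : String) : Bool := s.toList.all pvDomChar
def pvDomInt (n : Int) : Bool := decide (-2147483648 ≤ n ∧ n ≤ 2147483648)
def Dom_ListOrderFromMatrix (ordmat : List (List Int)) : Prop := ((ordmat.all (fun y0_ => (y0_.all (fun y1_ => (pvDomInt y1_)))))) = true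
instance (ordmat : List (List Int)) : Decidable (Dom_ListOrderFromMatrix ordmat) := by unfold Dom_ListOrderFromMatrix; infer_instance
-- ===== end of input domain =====

-- B replaces A's comparison sort of (index, score) pairs by a counting/bucket sort: scores lie in
-- [-n, n], so each index goes into bucket score+n and the buckets are concatenated in order
-- (stable by construction; objective: alternative algorithm for the ordering step).

-- ordmat[i][j] (both ports; indices are in range on Pre_, the default is never used there)
def pvEnt (m : List (List Int)) (i j : Int) : Int :=
  PySem.List.pyGetD (PySem.List.pyGetD m i []) j 0

-- ===== PORT A =====
def ListOrderFromMatrix (ordmat : List (List Int)) : List Int :=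
  let n : Int := (ordmat.length : Int)
  let ixskeys : List (Int × Int) :=
    (PySem.List.pyRange 0 n).foldl (fun acc i =>
      let keyval : Int :=
        (PySem.List.pyRange 0 n).foldl (fun keyval j =>
          let omdiff := pvEnt ordmat i j - pvEnt ordmat j i
          if omdiff > 0 then keyval + 1
          else if omdiff < 0 then keyval - 1
          else keyval) 0
      acc ++ [(i, keyval)]) []
  (PySem.List.sorted ixskeys (fun x => x.2)).map (fun x => x.1)

-- ===== PORT B =====
def ListOrderFromMatrix_alt (ordmat : List (List Int)) : List Int :=
  let n : Int := (ordmat.length : Int)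
  let buckets : List (List Int) :=
    (PySem.List.pyRange 0 n).foldl (fun bs i =>
      let row := PySem.List.pyGetD ordmat i []
      let s : Int :=
        (PySem.List.pyRange 0 n).foldl (fun s j =>
          s + ((if PySem.List.pyGetD row j 0 > pvEnt ordmat j i then 1 else 0)
             - (if PySem.List.pyGetD row j 0 < pvEnt ordmat j i then 1 else 0))) 0
      bs.set (s + n).toNat (bs.getD (s + n).toNat [] ++ [i]))
      (List.replicate (2 * ordmat.length + 1) [])
  buckets.foldl (fun out b => out ++ b) []

-- ===== PRECONDITION & SPEC =====
-- Pre_ excludes exactly the ragged matrices with a row shorter than len(ordmat), on which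
-- Python A raises IndexError (ordmat[i][j] with j out of range); Python B raises there too.
def Pre_ListOrderFromMatrix (ordmat : List (List Int)) : Prop :=
  ∀ row ∈ ordmat, ordmat.length ≤ row.length
instance (ordmat : List (List Int)) : Decidable (Pre_ListOrderFromMatrix ordmat) := by
  unfold Pre_ListOrderFromMatrix; infer_instance

def pvWitness_ListOrderFromMatrix : List (List Int) := [[0, 3], [1, 0]]

def Spec_ListOrderFromMatrix (ordmat : List (List Int)) (out : List Int) : Prop :=
  out = ListOrderFromMatrix_alt ordmat
instance (ordmat : List (List Int)) (out : List Int) : Decidable (Spec_ListOrderFromMatrix ordmat out) := by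
  unfold Spec_ListOrderFromMatrix; infer_instance

-- ===== CLAIM (what is proved, stated in full; the proofs are below) =====
def Claim_equal_ListOrderFromMatrix : Prop := ∀ (ordmat : List (List Int)), Dom_ListOrderFromMatrix ordmat → Pre_ListOrderFromMatrix ordmat → Spec_ListOrderFromMatrix ordmat (ListOrderFromMatrix ordmat)

-- ===== LEMMAS AND PROOFS =====

-- sign of the pairwise comparison of candidates i and j
def pvSgn (m : List (List Int)) (i j : Int) : Int :=
  if pvEnt m i j - pvEnt m j i > 0 then 1
  else if pvEnt m i j - pvEnt m j i < 0 then -1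
  else 0

-- A's score of candidate k
def pvKey (m : List (List Int)) (n k : Int) : Int :=
  ((PySem.List.pyRange 0 n).map (fun j => pvSgn m k j)).sum

-- ---- A-side characterisation ----

theorem pvInner_eq (m : List (List Int)) (n k : Int) :
    (PySem.List.pyRange 0 n).foldl (fun keyval j =>
        let omdiff := pvEnt m k j - pvEnt m j k
        if omdiff > 0 then keyval + 1
        else if omdiff < 0 then keyval - 1
        else keyval) 0 = pvKey m n k := by
  have h : (PySem.List.pyRange 0 n).foldl (fun keyval j =>
        let omdiff := pvEnt m k j - pvEnt m j k
        if omdiff > 0 then keyval + 1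
        else if omdiff < 0 then keyval - 1
        else keyval) 0
      = (PySem.List.pyRange 0 n).foldl (fun keyval j => keyval + pvSgn m k j) 0 := by
    apply PySem.List.foldl_congr_mem
    intro acc x _
    simp only [pvSgn]
    split_ifs <;> omega
  rw [h, PySem.List.foldl_add]
  simp [pvKey]

theorem pvA_eq_sorted (m : List (List Int)) :
    ListOrderFromMatrix m =
      (PySem.List.sorted ((PySem.List.pyRange 0 (m.length : Int)).map
          (fun i => (i, pvKey m (m.length : Int) i))) (fun x => x.2)).map (fun x => x.1) := by
  unfold ListOrderFromMatrix
  simp only [PySem.List.foldl_append_singleton_eq_map, List.nil_append]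
  congr 2
  apply List.map_congr_left
  intro i _
  simp only [pvInner_eq]

-- sorting the decorated list by the stored key is the decorated stable sort
theorem pvInsertBy_decorate {α : Type} (f : α → Int) (x : α) (ys : List α) :
    PySem.List.insertBy (fun a b => decide (a.2 < b.2)) (x, f x) (ys.map (fun y => (y, f y)))
      = (PySem.List.insertBy (fun a b => decide (f a < f b)) x ys).map (fun y => (y, f y)) := by
  induction ys with
  | nil => simp [PySem.List.insertBy]
  | cons y ys ih =>
    simp only [List.map_cons, PySem.List.insertBy]
    by_cases h : f x < f y
    · simp [h]
    · simp [h, ih]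

theorem pvSorted_decorate {α : Type} (xs : List α) (f : α → Int) :
    PySem.List.sorted (xs.map (fun x => (x, f x))) (fun p => p.2)
      = (PySem.List.sorted xs f).map (fun x => (x, f x)) := by
  rw [PySem.List.sorted_eq_foldl_insertBy, PySem.List.sorted_eq_foldl_insertBy]
  have h : ∀ (l acc : List α),
      List.map (fun y => (y, f y))
          (l.foldl (fun acc x => PySem.List.insertBy (fun a b => decide (f a < f b)) x acc) acc)
        = (l.map (fun x => (x, f x))).foldl
            (fun acc p => PySem.List.insertBy (fun a b => decide (a.2 < b.2)) p acc)
            (acc.map (fun y => (y, f y))) := by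
    intro l
    induction l with
    | nil => intro acc; simp
    | cons x t ih =>
      intro acc
      simp only [List.map_cons, List.foldl_cons]
      rw [ih, ← pvInsertBy_decorate]
  have := h xs []
  simp only [List.map_nil] at this
  exact this.symm

-- ---- the stable sort as a concatenation of key-fibres (counting sort) ----

theorem pvInsertBy_skip {α : Type} (before : α → α → Bool) (x : α) (ys zs : List α)
    (h : ∀ y ∈ ys, before x y = false) :
    PySem.List.insertBy before x (ys ++ zs) = ys ++ PySem.List.insertBy before x zs := by
  induction ys with
  | nil => simp
  | cons y t ih =>
    have hy : before x y = false := h y (by simp)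
    simp only [List.cons_append, PySem.List.insertBy, hy]
    simp [ih (fun z hz => h z (by simp [hz]))]

theorem pvInsertBy_all_before {α : Type} (before : α → α → Bool) (x : α) (zs : List α)
    (h : ∀ y ∈ zs, before x y = true) :
    PySem.List.insertBy before x zs = x :: zs := by
  cases zs with
  | nil => rfl
  | cons z t =>
    have hz : before x z = true := h z (by simp)
    simp [PySem.List.insertBy, hz]

theorem pvInsertBy_groups {α : Type} (key : α → Int) (vs : List Int) (g : Int → List α) (x : α)
    (hs : vs.Pairwise (· < ·)) (hx : key x ∈ vs)
    (hg : ∀ v ∈ vs, ∀ y ∈ g v, key y = v) :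
    PySem.List.insertBy (fun a b => decide (key a < key b)) x (vs.flatMap g)
      = vs.flatMap (fun v => g v ++ if key x = v then [x] else []) := by
  induction vs with
  | nil => simp at hx
  | cons v t ih =>
    have hpt : t.Pairwise (· < ·) := (List.pairwise_cons.mp hs).2
    have hvlt : ∀ u ∈ t, v < u := (List.pairwise_cons.mp hs).1
    by_cases hkv : key x = v
    · -- insert at the end of group v; every later key is > key x
      have hskip : ∀ y ∈ g v, (decide (key x < key y)) = false := by
        intro y hy
        have := hg v (by simp) y hy
        simp [this, hkv]
      have hafter : ∀ y ∈ t.flatMap g, (decide (key x < key y)) = true := by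
        intro y hy
        obtain ⟨u, hu, hyu⟩ := List.mem_flatMap.mp hy
        have := hg u (by simp [hu]) y hyu
        simp [this, hkv]
        exact hvlt u hu
      rw [List.flatMap_cons, pvInsertBy_skip _ _ _ _ hskip,
          pvInsertBy_all_before _ _ _ hafter]
      rw [List.flatMap_cons, if_pos hkv]
      have htail : t.flatMap (fun u => g u ++ if key x = u then [x] else []) = t.flatMap g := by
        apply List.flatMap_congr
        intro u hu
        have : ¬ key x = u := by
          have := hvlt u hu; omega
        simp [this]
      rw [htail]
      simp
    · -- key x belongs to a later group
      have hxt : key x ∈ t := by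
        rcases List.mem_cons.mp hx with h | h
        · exact absurd h hkv
        · exact h
      have hskip : ∀ y ∈ g v, (decide (key x < key y)) = false := by
        intro y hy
        have hky := hg v (by simp) y hy
        have : v < key x := hvlt _ hxt
        simp [hky]; omega
      rw [List.flatMap_cons, pvInsertBy_skip _ _ _ _ hskip,
          ih hpt hxt (fun u hu => hg u (by simp [hu]))]
      rw [List.flatMap_cons, if_neg hkv]
      simp

theorem pvFoldl_insert_groups {α : Type} (key : α → Int) (vs : List Int)
    (hs : vs.Pairwise (· < ·)) :
    ∀ (l p : List α), (∀ x ∈ l, key x ∈ vs) →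
    l.foldl (fun acc x => PySem.List.insertBy (fun a b => decide (key a < key b)) x acc)
        (vs.flatMap (fun v => p.filter (fun y => decide (key y = v))))
      = vs.flatMap (fun v => (p ++ l).filter (fun y => decide (key y = v))) := by
  intro l
  induction l with
  | nil => intro p _; simp
  | cons x t ih =>
    intro p hl
    simp only [List.foldl_cons]
    rw [pvInsertBy_groups key vs (fun v => p.filter (fun y => decide (key y = v))) x hs
      (hl x (by simp))
      (by intro v _ y hy
          have := List.of_mem_filter hy
          simpa using this)]
    have hgrp : (fun v => p.filter (fun y => decide (key y = v)) ++ if key x = v then [x] else [])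
        = (fun v => (p ++ [x]).filter (fun y => decide (key y = v))) := by
      funext v
      rw [List.filter_append]
      by_cases h : key x = v <;> simp [h]
    rw [hgrp, ih (p ++ [x]) (fun y hy => hl y (by simp [hy]))]
    simp

theorem pvSorted_groups {α : Type} (key : α → Int) (vs : List Int) (l : List α)
    (hs : vs.Pairwise (· < ·)) (hl : ∀ x ∈ l, key x ∈ vs) :
    PySem.List.sorted l key = vs.flatMap (fun v => l.filter (fun y => decide (key y = v))) := by
  rw [PySem.List.sorted_eq_foldl_insertBy]
  have h0 : vs.flatMap (fun v => ([] : List α).filter (fun y => decide (key y = v))) = [] := by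
    simp
  have := pvFoldl_insert_groups key vs hs l [] hl
  rw [h0] at this
  simpa using this

-- ---- B-side characterisation ----

theorem pvInnerB_eq (m : List (List Int)) (n k : Int) :
    (PySem.List.pyRange 0 n).foldl (fun s j =>
        s + ((if PySem.List.pyGetD (PySem.List.pyGetD m k []) j 0 > pvEnt m j k then 1 else 0)
           - (if PySem.List.pyGetD (PySem.List.pyGetD m k []) j 0 < pvEnt m j k then 1 else 0))) 0
      = pvKey m n k := by
  have h : (PySem.List.pyRange 0 n).foldl (fun s j =>
        s + ((if PySem.List.pyGetD (PySem.List.pyGetD m k []) j 0 > pvEnt m j k then 1 else 0)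
           - (if PySem.List.pyGetD (PySem.List.pyGetD m k []) j 0 < pvEnt m j k then 1 else 0))) 0
      = (PySem.List.pyRange 0 n).foldl (fun s j => s + pvSgn m k j) 0 := by
    apply PySem.List.foldl_congr_mem
    intro acc x _
    simp only [pvSgn, pvEnt]
    split_ifs <;> omega
  rw [h, PySem.List.foldl_add]
  simp [pvKey]

-- every score is a sum of n signs, hence lies in [-n, n]
theorem pvSum_sgn_bounds (l : List Int) (f : Int → Int) (hf : ∀ x, -1 ≤ f x ∧ f x ≤ 1) :
    -(l.length : Int) ≤ (l.map f).sum ∧ (l.map f).sum ≤ (l.length : Int) := by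
  induction l with
  | nil => simp
  | cons a t ih =>
    have := hf a
    simp only [List.map_cons, List.sum_cons, List.length_cons]
    push_cast
    omega

theorem pvKey_bounds (m : List (List Int)) (k : Int) :
    -(m.length : Int) ≤ pvKey m (m.length : Int) k ∧ pvKey m (m.length : Int) k ≤ (m.length : Int) := by
  have hb := pvSum_sgn_bounds (PySem.List.pyRange 0 (m.length : Int)) (pvSgn m k)
    (by intro x; unfold pvSgn; split_ifs <;> omega)
  have hlen : ((PySem.List.pyRange 0 (m.length : Int)).length : Int) = (m.length : Int) := by
    rw [PySem.List.length_pyRange_one]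
    omega
  unfold pvKey
  rw [hlen] at hb
  exact hb

-- the bucket fold builds exactly the fibres of the position function
theorem pvBucketFold (pos : Int → Nat) (M : Nat) :
    ∀ (l p : List Int), (∀ i ∈ l, pos i < M) →
    l.foldl (fun bs i => bs.set (pos i) (bs.getD (pos i) [] ++ [i]))
        ((List.range M).map (fun t => p.filter (fun i => decide (pos i = t))))
      = (List.range M).map (fun t => (p ++ l).filter (fun i => decide (pos i = t))) := by
  intro l
  induction l with
  | nil => intro p _; simp
  | cons x t ih =>
    intro p hl
    have hx : pos x < M := hl x (by simp)
    simp only [List.foldl_cons]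
    have hget : ((List.range M).map (fun t => p.filter (fun i => decide (pos i = t)))).getD (pos x) []
        = p.filter (fun i => decide (pos i = pos x)) := by
      rw [List.getD_eq_getElem?_getD, List.getElem?_map, List.getElem?_range hx]
      rfl
    rw [hget]
    have hset : ((List.range M).map (fun t => p.filter (fun i => decide (pos i = t)))).set (pos x)
          (p.filter (fun i => decide (pos i = pos x)) ++ [x])
        = (List.range M).map (fun t => (p ++ [x]).filter (fun i => decide (pos i = t))) := by
      apply List.ext_getElem
      · simp
      · intro k hk1 hk2
        simp only [List.length_set, List.length_map, List.length_range] at hk1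
        rw [List.getElem_set, List.getElem_map, List.getElem_range]
        by_cases hkx : pos x = k
        · subst hkx
          simp only [List.filter_append]
          simp
        · rw [if_neg hkx, List.getElem_map, List.getElem_range, List.filter_append]
          have : (decide (pos x = k)) = false := by simp [hkx]
          simp [List.filter, this]
    rw [hset, ih (p ++ [x]) (fun y hy => hl y (by simp [hy]))]
    simp

-- abbreviation for the bucket position of candidate i (proof-side only)
def pvPos (m : List (List Int)) (i : Int) : Nat := (pvKey m (m.length : Int) i + (m.length : Int)).toNat

theorem pvPos_lt (m : List (List Int)) (i : Int) : pvPos m i < 2 * m.length + 1 := by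
  have hb := pvKey_bounds m i
  unfold pvPos
  omega

-- ===== VERDICT (by name: the statement is the Claim_ definition above) =====
theorem ListOrderFromMatrix_spec : Claim_equal_ListOrderFromMatrix := by
  intro m _ _
  unfold Spec_ListOrderFromMatrix
  -- A is the stable ascending sort of the indices by their score
  rw [pvA_eq_sorted, pvSorted_decorate, List.map_map]
  have hid : ((fun (x : Int × Int) => x.1) ∘ fun x => (x, pvKey m (m.length : Int) x)) = id := rfl
  rw [hid, List.map_id]
  -- B: rewrite the bucket fold's step to use the score
  unfold ListOrderFromMatrix_alt
  have hstep : (PySem.List.pyRange 0 (m.length : Int)).foldl (fun bs i =>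
      let row := PySem.List.pyGetD m i []
      let s : Int :=
        (PySem.List.pyRange 0 (m.length : Int)).foldl (fun s j =>
          s + ((if PySem.List.pyGetD row j 0 > pvEnt m j i then 1 else 0)
             - (if PySem.List.pyGetD row j 0 < pvEnt m j i then 1 else 0))) 0
      bs.set (s + (m.length : Int)).toNat (bs.getD (s + (m.length : Int)).toNat [] ++ [i]))
      (List.replicate (2 * m.length + 1) [])
      = (PySem.List.pyRange 0 (m.length : Int)).foldl (fun bs i =>
          bs.set (pvPos m i) (bs.getD (pvPos m i) [] ++ [i]))
          (List.replicate (2 * m.length + 1) []) := by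
    apply PySem.List.foldl_congr_mem
    intro bs i _
    simp only [pvInnerB_eq, pvPos]
  simp only []
  rw [hstep]
  -- the initial bucket list is the fibre picture of the empty prefix
  have hinit : (List.replicate (2 * m.length + 1) ([] : List Int))
      = (List.range (2 * m.length + 1)).map
          (fun t => ([] : List Int).filter (fun i => decide (pvPos m i = t))) := by
    simp [List.map_const', List.filter]
  rw [hinit, pvBucketFold (pvPos m) (2 * m.length + 1) (PySem.List.pyRange 0 (m.length : Int)) []
      (fun i _ => pvPos_lt m i)]
  rw [PySem.List.foldl_append_eq_flatten, List.nil_append, List.nil_append]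
  -- reindex the buckets by score value
  have hre : (List.range (2 * m.length + 1)).map
        (fun t => (PySem.List.pyRange 0 (m.length : Int)).filter (fun i => decide (pvPos m i = t)))
      = (List.range (2 * m.length + 1)).map
        (fun (t : Nat) => (PySem.List.pyRange 0 (m.length : Int)).filter
            (fun i => decide (pvKey m (m.length : Int) i = (t : Int) - (m.length : Int)))) := by
    apply List.map_congr_left
    intro t _
    apply List.filter_congr
    intro i _
    have hb := pvKey_bounds m i
    have hiff : (pvPos m i = t) ↔ (pvKey m (m.length : Int) i = (t : Int) - (m.length : Int)) := by
      unfold pvPos; omega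
    simp [hiff]
  rw [hre]
  -- buckets concatenated = stable sort by score (counting sort correctness)
  have hvs : PySem.List.sorted (PySem.List.pyRange 0 (m.length : Int)) (pvKey m (m.length : Int))
      = ((List.range (2 * m.length + 1)).map (fun (t : Nat) => (t : Int) - (m.length : Int))).flatMap
          (fun v => (PySem.List.pyRange 0 (m.length : Int)).filter
              (fun i => decide (pvKey m (m.length : Int) i = v))) := by
    apply pvSorted_groups
    · refine List.Pairwise.map _ ?_ (List.pairwise_lt_range)
      intro a b hab
      omega
    · intro i _
      have hb := pvKey_bounds m i
      refine List.mem_map.mpr ⟨pvPos m i, List.mem_range.mpr (pvPos_lt m i), ?_⟩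
      unfold pvPos
      omega
  rw [hvs, List.flatMap_map, List.flatMap_def]
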